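-- pv_equiv track=rewrite | github.com/cr-heidemann/Text2Scene | Auswertung.py | prepositions
-- ===== SOURCE A (Python) =====
-- from collections import Counter
--
-- def extract(liste, d, i,  s, e):
--     s= liste[d][i].find(s) + len(s)
--     e=liste[d][i].find(e)
--     word=liste[d][i][s:e]
--     return word
--
-- def prepositions(sentences, liste):
--     s_id={}
--     qs_s=[]
--     o_s=[]
--     lines = sentences
--     for doc in range(len(lines)):
--         for line in range(len(lines[doc])):
--         # each doc is list of string in list, so each string is a line
--         #if line contains <SPATIAL_SIGNAL, save id and text
--             """if "<SPATIAL_SIGNAL" in lines[line]: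
--             start= lines[line].find('id="') + len('id="')
--             end=lines[line].find('" start="')
--             key=lines[line][start:end]
--             start= lines[line].find('text="') + len('text="')
--             end=lines[line].find('" cluster="')
--             value=lines[line][start:end]
--             s_id[key]=value"""
--             if "<SPATIAL_SIGNAL" in lines[doc][line]:
--                 key=extract(lines, doc, line, 'id="', '" start="')
--                 value=extract(lines, doc, line, 'text="', '" cluster="')
--                 s_id[key]=value
--             if "<QSLINK" in lines[doc][line]:
--                 word=extract(lines, doc, line, 'trigger="', '" comment="')
--                 qs_s.append(word)
--             if "<OLINK" in lines[doc][line]: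
--                 word=extract(lines,doc, line, 'trigger="', '" frame_type="')
--                 o_s.append(word)
--     qs_s[:] = [i for i in qs_s if i]
--     o_s[:] = [i for i in o_s if i]
--     # for each id in the lists, repalce it with value(text)
--     qs_s = [s_id.get(i, i) for i in qs_s]
--     qs_s=Counter(qs_s)
--     o_s = [s_id.get(i, i) for i in o_s]
--     o_s=Counter(o_s)
--     return qs_s, o_s
-- ===== SOURCE B (Python) =====
-- from collections import Counter
--
-- def _between(line, s, e):
--     return line[line.find(s) + len(s): line.find(e)]
--
-- def prepositions(sentences, liste):
--     # pass 1: build the complete signal index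
--     s_id = {}
--     for doc in sentences:
--         for line in doc:
--             if "<SPATIAL_SIGNAL" in line:
--                 s_id[_between(line, 'id="', '" start="')] = _between(line, 'text="', '" cluster="')
--     # pass 2: count mapped triggers directly (no intermediate lists)
--     qs, o = Counter(), Counter()
--     for doc in sentences:
--         for line in doc:
--             if "<QSLINK" in line:
--                 w = _between(line, 'trigger="', '" comment="')
--                 if w:
--                     qs[s_id.get(w, w)] += 1
--             if "<OLINK" in line:
--                 w = _between(line, 'trigger="', '" frame_type="')
--                 if w:
--                     o[s_id.get(w, w)] += 1
--     return qs, o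
-- ===== Notes on version B (the rewrite author's own statement) =====
-- stated objective: simpler
-- what changed: Two-pass decomposition: first pass builds the complete signal index, second pass counts the mapped non-empty triggers directly into two Counters, eliminating the intermediate raw lists, the truthiness filter pass and the two remapping comprehensions.
import Mathlib
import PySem

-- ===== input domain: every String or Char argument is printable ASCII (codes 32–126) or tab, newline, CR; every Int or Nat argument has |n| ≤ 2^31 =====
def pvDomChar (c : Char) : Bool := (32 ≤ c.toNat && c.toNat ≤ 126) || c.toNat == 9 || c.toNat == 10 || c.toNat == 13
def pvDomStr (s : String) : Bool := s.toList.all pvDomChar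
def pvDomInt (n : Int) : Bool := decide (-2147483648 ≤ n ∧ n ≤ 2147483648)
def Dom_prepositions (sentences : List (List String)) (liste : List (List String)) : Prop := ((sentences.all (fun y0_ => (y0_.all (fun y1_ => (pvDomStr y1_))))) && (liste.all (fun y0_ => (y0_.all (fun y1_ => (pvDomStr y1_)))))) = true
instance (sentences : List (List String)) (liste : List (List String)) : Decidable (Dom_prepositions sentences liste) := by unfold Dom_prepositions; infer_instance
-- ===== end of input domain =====

-- B restructures A into two passes (build the full signal index first, then count the mapped
-- non-empty triggers directly into two counters), removing the intermediate lists and the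
-- separate filter/remap comprehensions; objective: simpler, same asymptotic cost.


-- ===== PORT A =====
-- word = liste[d][i][liste[d][i].find(s)+len(s) : liste[d][i].find(e)]
def extract (liste : List (List String)) (d i : Int) (s e : String) : String :=
  let s' := PySem.Str.find (PySem.List.pyGetD (PySem.List.pyGetD liste d []) i "") s + PySem.Str.len s
  let e' := PySem.Str.find (PySem.List.pyGetD (PySem.List.pyGetD liste d []) i "") e
  PySem.Str.slice (PySem.List.pyGetD (PySem.List.pyGetD liste d []) i "") (some s') (some e')

def prepositions (sentences : List (List String)) (liste : List (List String)) : (List (String × Int)) × (List (String × Int)) :=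
  let lines := sentences
  let st :=
    (PySem.List.pyRange 0 (PySem.List.len lines)).foldl (fun st doc =>
      (PySem.List.pyRange 0 (PySem.List.len (PySem.List.pyGetD lines doc []))).foldl (fun st line =>
        let st :=
          if PySem.Str.isIn "<SPATIAL_SIGNAL" (PySem.List.pyGetD (PySem.List.pyGetD lines doc []) line "") then
            (st.1.insert (extract lines doc line "id=\"" "\" start=\"")
                         (extract lines doc line "text=\"" "\" cluster=\""), st.2.1, st.2.2)
          else st
        let st :=
          if PySem.Str.isIn "<QSLINK" (PySem.List.pyGetD (PySem.List.pyGetD lines doc []) line "") then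
            (st.1, st.2.1 ++ [extract lines doc line "trigger=\"" "\" comment=\""], st.2.2)
          else st
        if PySem.Str.isIn "<OLINK" (PySem.List.pyGetD (PySem.List.pyGetD lines doc []) line "") then
          (st.1, st.2.1, st.2.2 ++ [extract lines doc line "trigger=\"" "\" frame_type=\""])
        else st) st)
      ((PySem.Dict.empty : PySem.Dict String String), ([] : List String), ([] : List String))
  let s_id := st.1
  let qs_s := st.2.1.filter (fun i => i != "")
  let o_s := st.2.2.filter (fun i => i != "")
  let qs_m := qs_s.map (fun i => s_id.getD i i)
  let o_m := o_s.map (fun i => s_id.getD i i)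
  ((PySem.Dict.counter qs_m).items, (PySem.Dict.counter o_m).items)

-- ===== PORT B =====
-- word = line[line.find(s)+len(s) : line.find(e)]
def between (line s e : String) : String :=
  PySem.Str.slice line (some (PySem.Str.find line s + PySem.Str.len s)) (some (PySem.Str.find line e))

def prepositions_alt (sentences : List (List String)) (liste : List (List String)) : (List (String × Int)) × (List (String × Int)) :=
  let s_id := sentences.foldl (fun d doc => doc.foldl (fun d line =>
      if PySem.Str.isIn "<SPATIAL_SIGNAL" line then
        d.insert (between line "id=\"" "\" start=\"") (between line "text=\"" "\" cluster=\"")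
      else d) d) (PySem.Dict.empty : PySem.Dict String String)
  let cnt := sentences.foldl (fun c doc => doc.foldl (fun c line =>
      let c :=
        if PySem.Str.isIn "<QSLINK" line then
          let w := between line "trigger=\"" "\" comment=\""
          if w != "" then (PySem.Dict.modify c.1 (s_id.getD w w) 0 (· + 1), c.2) else c
        else c
      if PySem.Str.isIn "<OLINK" line then
        let w := between line "trigger=\"" "\" frame_type=\""
        if w != "" then (c.1, PySem.Dict.modify c.2 (s_id.getD w w) 0 (· + 1)) else c
      else c) c)
      ((PySem.Dict.empty : PySem.Dict String Int), (PySem.Dict.empty : PySem.Dict String Int))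
  (cnt.1.items, cnt.2.items)

-- ===== PRECONDITION & SPEC =====
def Spec_prepositions (sentences : List (List String)) (liste : List (List String)) (out : (List (String × Int)) × (List (String × Int))) : Prop := out = prepositions_alt sentences liste
instance (sentences : List (List String)) (liste : List (List String)) (out : (List (String × Int)) × (List (String × Int))) : Decidable (Spec_prepositions sentences liste out) := by unfold Spec_prepositions; infer_instance

-- ===== CLAIM (what is proved, stated in full; the proofs are below) =====
def Claim_equal_prepositions : Prop := ∀ (sentences : List (List String)) (liste : List (List String)), Dom_prepositions sentences liste → Spec_prepositions sentences liste (prepositions sentences liste)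

-- ===== LEMMAS AND PROOFS =====

-- named per-line pieces shared by the two characterisations
def stepS (d : PySem.Dict String String) (l : String) : PySem.Dict String String :=
  if PySem.Str.isIn "<SPATIAL_SIGNAL" l then
    d.insert (between l "id=\"" "\" start=\"") (between l "text=\"" "\" cluster=\"")
  else d

def wQ (l : String) : String := between l "trigger=\"" "\" comment=\""
def wO (l : String) : String := between l "trigger=\"" "\" frame_type=\""

def stepQ (q : List String) (l : String) : List String :=
  if PySem.Str.isIn "<QSLINK" l then q ++ [wQ l] else q
def stepO (o : List String) (l : String) : List String :=
  if PySem.Str.isIn "<OLINK" l then o ++ [wO l] else o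

def lineA (st : PySem.Dict String String × List String × List String) (l : String) :
    PySem.Dict String String × List String × List String :=
  let st := if PySem.Str.isIn "<SPATIAL_SIGNAL" l then
      (st.1.insert (between l "id=\"" "\" start=\"") (between l "text=\"" "\" cluster=\""), st.2.1, st.2.2)
    else st
  let st := if PySem.Str.isIn "<QSLINK" l then (st.1, st.2.1 ++ [wQ l], st.2.2) else st
  if PySem.Str.isIn "<OLINK" l then (st.1, st.2.1, st.2.2 ++ [wO l]) else st

def incrQ (sid : PySem.Dict String String) (c : PySem.Dict String Int) (l : String) : PySem.Dict String Int :=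
  if PySem.Str.isIn "<QSLINK" l then
    (if wQ l != "" then PySem.Dict.modify c (sid.getD (wQ l) (wQ l)) 0 (· + 1) else c)
  else c
def incrO (sid : PySem.Dict String String) (c : PySem.Dict String Int) (l : String) : PySem.Dict String Int :=
  if PySem.Str.isIn "<OLINK" l then
    (if wO l != "" then PySem.Dict.modify c (sid.getD (wO l) (wO l)) 0 (· + 1) else c)
  else c

-- A's nested index loop, with its line body named
def foldAllA (xs : List (List String)) : PySem.Dict String String × List String × List String :=
  (PySem.List.pyRange 0 (PySem.List.len xs)).foldl (fun st doc =>
    (PySem.List.pyRange 0 (PySem.List.len (PySem.List.pyGetD xs doc []))).foldl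
      (fun st line => lineA st (PySem.List.pyGetD (PySem.List.pyGetD xs doc []) line "")) st)
    ((PySem.Dict.empty : PySem.Dict String String), ([] : List String), ([] : List String))

-- B's two passes, with their bodies named
def sidB (xs : List (List String)) : PySem.Dict String String :=
  xs.foldl (fun d doc => doc.foldl stepS d) PySem.Dict.empty

def foldCnt (sid : PySem.Dict String String) (xs : List (List String)) :
    PySem.Dict String Int × PySem.Dict String Int :=
  xs.foldl (fun c doc => doc.foldl (fun c line =>
      let c :=
        if PySem.Str.isIn "<QSLINK" line then
          let w := between line "trigger=\"" "\" comment=\""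
          if w != "" then (PySem.Dict.modify c.1 (sid.getD w w) 0 (· + 1), c.2) else c
        else c
      if PySem.Str.isIn "<OLINK" line then
        let w := between line "trigger=\"" "\" frame_type=\""
        if w != "" then (c.1, PySem.Dict.modify c.2 (sid.getD w w) 0 (· + 1)) else c
      else c) c) (PySem.Dict.empty, PySem.Dict.empty)

-- the ports, definitionally, in terms of the named folds
theorem A_char (sentences liste : List (List String)) :
    prepositions sentences liste =
      ((PySem.Dict.counter (((foldAllA sentences).2.1.filter (fun i => i != "")).map
          (fun i => (foldAllA sentences).1.getD i i))).items,
       (PySem.Dict.counter (((foldAllA sentences).2.2.filter (fun i => i != "")).map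
          (fun i => (foldAllA sentences).1.getD i i))).items) := rfl

theorem B_char (sentences liste : List (List String)) :
    prepositions_alt sentences liste =
      ((foldCnt (sidB sentences) sentences).1.items, (foldCnt (sidB sentences) sentences).2.items) := rfl

-- nested "for doc in range(len(xs)): for line in range(len(xs[doc]))" is a fold over the flattened lines
theorem nested_pyRange_eq {s : Type} (xs : List (List String)) (g : s -> String -> s) (init : s) :
    (PySem.List.pyRange 0 (PySem.List.len xs)).foldl (fun st doc =>
      (PySem.List.pyRange 0 (PySem.List.len (PySem.List.pyGetD xs doc []))).foldl
        (fun st line => g st (PySem.List.pyGetD (PySem.List.pyGetD xs doc []) line "")) st) init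
    = xs.flatten.foldl g init := by
  have h := PySem.List.foldl_pyRange_pyGetD xs []
      (fun st docL => (PySem.List.pyRange 0 (PySem.List.len docL)).foldl
        (fun st line => g st (PySem.List.pyGetD docL line "")) st) init (a := 0) le_rfl
  simp only [Int.toNat_zero, List.drop_zero] at h
  rw [h, List.foldl_flatten]
  refine PySem.List.foldl_congr_mem xs _ _ init (fun st docL _ => ?_)
  simpa using PySem.List.foldl_pyRange_pyGetD docL "" g st (a := 0) le_rfl

theorem lineA_eq (st : PySem.Dict String String × List String × List String) (l : String) :
    lineA st l = (stepS st.1 l, stepQ st.2.1 l, stepO st.2.2 l) := by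
  obtain ⟨d, q, o⟩ := st
  simp only [lineA, stepS, stepQ, stepO]
  split_ifs <;> rfl

theorem lineB_eq (sid : PySem.Dict String String)
    (c : PySem.Dict String Int × PySem.Dict String Int) (l : String) :
    (let c' :=
        if PySem.Str.isIn "<QSLINK" l then
          let w := between l "trigger=\"" "\" comment=\""
          if w != "" then (PySem.Dict.modify c.1 (sid.getD w w) 0 (· + 1), c.2) else c
        else c
     if PySem.Str.isIn "<OLINK" l then
        let w := between l "trigger=\"" "\" frame_type=\""
        if w != "" then (c'.1, PySem.Dict.modify c'.2 (sid.getD w w) 0 (· + 1)) else c'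
     else c')
    = (incrQ sid c.1 l, incrO sid c.2 l) := by
  obtain ⟨cq, co⟩ := c
  simp only [incrQ, incrO, wQ, wO]
  split_ifs <;> rfl

theorem foldAllA_eq (xs : List (List String)) :
    foldAllA xs =
      (xs.flatten.foldl stepS PySem.Dict.empty,
       (xs.flatten.filter (PySem.Str.isIn "<QSLINK")).map wQ,
       (xs.flatten.filter (PySem.Str.isIn "<OLINK")).map wO) := by
  unfold foldAllA
  rw [nested_pyRange_eq xs lineA]
  rw [PySem.List.foldl_congr_mem xs.flatten lineA
        (fun st l => (stepS st.1 l, stepQ st.2.1 l, stepO st.2.2 l)) _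
        (fun st l _ => lineA_eq st l)]
  rw [PySem.List.foldl_prod_mk (f := stepS) (g := fun p e => (stepQ p.1 e, stepO p.2 e)),
      PySem.List.foldl_prod_mk (f := stepQ) (g := stepO)]
  have hq : xs.flatten.foldl stepQ [] =
      (xs.flatten.filter (PySem.Str.isIn "<QSLINK")).map wQ := by
    show xs.flatten.foldl (fun q l => if PySem.Str.isIn "<QSLINK" l then q ++ [wQ l] else q) [] = _
    simpa using PySem.List.foldl_append_if (PySem.Str.isIn "<QSLINK") wQ xs.flatten []
  have ho : xs.flatten.foldl stepO [] =
      (xs.flatten.filter (PySem.Str.isIn "<OLINK")).map wO := by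
    show xs.flatten.foldl (fun o l => if PySem.Str.isIn "<OLINK" l then o ++ [wO l] else o) [] = _
    simpa using PySem.List.foldl_append_if (PySem.Str.isIn "<OLINK") wO xs.flatten []
  rw [hq, ho]

theorem sidB_eq (xs : List (List String)) :
    sidB xs = xs.flatten.foldl stepS PySem.Dict.empty :=
  (List.foldl_flatten).symm

theorem foldCnt_eq (sid : PySem.Dict String String) (xs : List (List String)) :
    foldCnt sid xs =
      (xs.flatten.foldl (incrQ sid) PySem.Dict.empty, xs.flatten.foldl (incrO sid) PySem.Dict.empty) := by
  unfold foldCnt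
  have hb : (fun (c : PySem.Dict String Int × PySem.Dict String Int) line =>
      let c :=
        if PySem.Str.isIn "<QSLINK" line then
          let w := between line "trigger=\"" "\" comment=\""
          if w != "" then (PySem.Dict.modify c.1 (sid.getD w w) 0 (· + 1), c.2) else c
        else c
      if PySem.Str.isIn "<OLINK" line then
        let w := between line "trigger=\"" "\" frame_type=\""
        if w != "" then (c.1, PySem.Dict.modify c.2 (sid.getD w w) 0 (· + 1)) else c
      else c)
      = fun c l => (incrQ sid c.1 l, incrO sid c.2 l) :=
    funext fun c => funext fun l => lineB_eq sid c l
  rw [hb, ← List.foldl_flatten, PySem.List.foldl_prod_mk (f := incrQ sid) (g := incrO sid)]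

theorem incrQ_fold (sid : PySem.Dict String String) (L : List String) :
    L.foldl (incrQ sid) PySem.Dict.empty =
      PySem.Dict.counter ((((L.filter (PySem.Str.isIn "<QSLINK")).map wQ).filter
        (fun i => i != "")).map (fun i => sid.getD i i)) := by
  have hc : PySem.Dict.counter ((((L.filter (PySem.Str.isIn "<QSLINK")).map wQ).filter
        (fun i => i != "")).map (fun i => sid.getD i i))
      = L.foldl (fun c l => if PySem.Str.isIn "<QSLINK" l then
          (if wQ l != "" then PySem.Dict.modify c (sid.getD (wQ l) (wQ l)) 0 (· + 1) else c) else c)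
        PySem.Dict.empty := by
    rw [PySem.Dict.counter_eq_foldl, List.foldl_map, ← PySem.List.foldl_if_eq_foldl_filter,
        List.foldl_map, ← PySem.List.foldl_if_eq_foldl_filter]
  rw [hc]
  rfl

theorem incrO_fold (sid : PySem.Dict String String) (L : List String) :
    L.foldl (incrO sid) PySem.Dict.empty =
      PySem.Dict.counter ((((L.filter (PySem.Str.isIn "<OLINK")).map wO).filter
        (fun i => i != "")).map (fun i => sid.getD i i)) := by
  have hc : PySem.Dict.counter ((((L.filter (PySem.Str.isIn "<OLINK")).map wO).filter
        (fun i => i != "")).map (fun i => sid.getD i i))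
      = L.foldl (fun c l => if PySem.Str.isIn "<OLINK" l then
          (if wO l != "" then PySem.Dict.modify c (sid.getD (wO l) (wO l)) 0 (· + 1) else c) else c)
        PySem.Dict.empty := by
    rw [PySem.Dict.counter_eq_foldl, List.foldl_map, ← PySem.List.foldl_if_eq_foldl_filter,
        List.foldl_map, ← PySem.List.foldl_if_eq_foldl_filter]
  rw [hc]
  rfl

theorem prepositions_eq (sentences liste : List (List String)) :
    prepositions sentences liste = prepositions_alt sentences liste := by
  rw [A_char sentences liste, B_char sentences liste, foldAllA_eq, foldCnt_eq, sidB_eq,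
      incrQ_fold, incrO_fold]

-- ===== VERDICT (by name: the statement is the Claim_ definition above) =====
theorem prepositions_spec : Claim_equal_prepositions := by
  intro sentences liste _
  exact prepositions_eq sentences liste
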